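-- pv_equiv track=rewrite | github.com/jtamames/SqueezeMeta | bin/Flye-2.8.1/flye/trestle/trestle.py | _index_mapping
-- ===== SOURCE A (Python) =====
-- def _index_mapping(aln):
--     #Given a genomic index, return the alignment index of the alignment
--     al_inds = []
--     #Given an alignment index, return the genomic index at that position
--     gen_inds = []
--     for i,b in enumerate(aln):
--         gen_inds.append(len(al_inds))
--         if b != '-':
--             al_inds.append(i)
--     return al_inds, gen_inds
-- ===== SOURCE B (Python) =====
-- def _index_mapping(aln):
--     # Build the genomic->alignment map first, then invert it by run-filling.
--     al_inds = [i for i, b in enumerate(aln) if b != '-']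
--     gen_inds = []
--     for k, pos in enumerate(al_inds):
--         while len(gen_inds) <= pos:
--             gen_inds.append(k)
--     while len(gen_inds) < len(aln):
--         gen_inds.append(len(al_inds))
--     return al_inds, gen_inds
-- ===== Notes on version B (the rewrite author's own statement) =====
-- stated objective: alternative
-- what changed: B first builds al_inds by a comprehension over enumerate(aln), then derives gen_inds by run-filling positions up to each non-gap with its genomic index and padding trailing gaps, instead of A's single scan that counts during traversal.
import Mathlib
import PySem

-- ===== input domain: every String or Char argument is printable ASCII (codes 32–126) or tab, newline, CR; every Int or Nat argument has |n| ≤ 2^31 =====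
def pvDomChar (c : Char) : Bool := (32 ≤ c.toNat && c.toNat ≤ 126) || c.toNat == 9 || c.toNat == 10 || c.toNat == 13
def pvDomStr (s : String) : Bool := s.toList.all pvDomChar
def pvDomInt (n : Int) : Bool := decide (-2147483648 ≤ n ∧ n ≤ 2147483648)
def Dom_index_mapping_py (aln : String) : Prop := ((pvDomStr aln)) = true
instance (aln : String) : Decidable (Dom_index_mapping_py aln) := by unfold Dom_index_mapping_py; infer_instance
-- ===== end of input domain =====

-- B builds the genomic→alignment map first and inverts it by run-filling, instead of A's
-- counting single scan; same cost, different decomposition (objective: alternative).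

-- ===== PORT A =====
-- one pass over enumerate(aln): append the running non-gap count, collect non-gap positions
def index_mapping_py (aln : String) : List Int × List Int :=
  (PySem.List.enumerate aln.toList).foldl
    (fun st p =>
      let gen := st.2 ++ [(st.1.length : Int)]
      if p.2 ≠ '-' then (st.1 ++ [p.1], gen) else (st.1, gen))
    ([], [])

-- ===== PORT B =====
-- while len(gen_inds) <= pos: gen_inds.append(k)
def pvFillWhile (gen : List Int) (pos : Int) (k : Int) : List Int :=
  if (gen.length : Int) ≤ pos then pvFillWhile (gen ++ [k]) pos k else gen
termination_by (pos + 1 - gen.length).toNat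
decreasing_by simp_all; omega

-- while len(gen_inds) < len(aln): gen_inds.append(len(al_inds))
def pvPadTail (gen : List Int) (n : Nat) (v : Int) : List Int :=
  if gen.length < n then pvPadTail (gen ++ [v]) n v else gen
termination_by n - gen.length
decreasing_by simp_all; omega

def index_mapping_py_alt (aln : String) : List Int × List Int :=
  let al_inds : List Int :=
    (PySem.List.enumerate aln.toList).filterMap
      (fun p => if p.2 ≠ '-' then some p.1 else none)
  let gen_inds : List Int :=
    (PySem.List.enumerate al_inds).foldl
      (fun gen p => pvFillWhile gen p.2 p.1) []
  (al_inds, pvPadTail gen_inds aln.toList.length (al_inds.length : Int))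

-- ===== PRECONDITION & SPEC =====
def Spec_index_mapping_py (aln : String) (out : List Int × List Int) : Prop := out = index_mapping_py_alt aln
instance (aln : String) (out : List Int × List Int) : Decidable (Spec_index_mapping_py aln out) := by unfold Spec_index_mapping_py; infer_instance

-- ===== CLAIM (what is proved, stated in full; the proofs are below) =====
def Claim_equal_index_mapping_py : Prop := ∀ (aln : String), Dom_index_mapping_py aln → Spec_index_mapping_py aln (index_mapping_py aln)

-- ===== LEMMAS AND PROOFS =====

-- reference spec: positions of non-gaps starting at alignment index i
def pvA : List Char → Int → List Int
  | [], _ => []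
  | c :: cs, i => if c ≠ '-' then i :: pvA cs (i + 1) else pvA cs (i + 1)

-- reference spec: genomic index per alignment position, k non-gaps seen so far
def pvG : List Char → Int → List Int
  | [], _ => []
  | c :: cs, k => if c ≠ '-' then k :: pvG cs (k + 1) else k :: pvG cs k

-- count of non-gaps
def pvC : List Char → Nat
  | [] => 0
  | c :: cs => (if c ≠ '-' then 1 else 0) + pvC cs

theorem pvA_len (cs : List Char) (i : Int) : (pvA cs i).length = pvC cs := by
  induction cs generalizing i with
  | nil => rfl
  | cons c cs ih => simp [pvA, pvC]; split_ifs <;> simp [ih, Nat.add_comm]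

theorem portA_spec (cs : List Char) (i : Int) (al gen : List Int) :
    (PySem.List.enumerate cs i).foldl
      (fun st p =>
        let g := st.2 ++ [(st.1.length : Int)]
        if p.2 ≠ '-' then (st.1 ++ [p.1], g) else (st.1, g))
      (al, gen)
    = (al ++ pvA cs i, gen ++ pvG cs al.length) := by
  induction cs generalizing i al gen with
  | nil => simp [PySem.List.enumerate_nil, pvA, pvG]
  | cons c cs ih =>
    rw [PySem.List.enumerate_cons, List.foldl_cons]
    dsimp only
    by_cases h : c = '-'
    · rw [if_neg (by simp [h]), ih]
      simp [pvA, pvG, h]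
    · rw [if_pos (by simp [h]), ih]
      simp [pvA, pvG, h]

theorem portB_al (cs : List Char) (i : Int) :
    (PySem.List.enumerate cs i).filterMap
      (fun p => if p.2 ≠ '-' then some p.1 else none) = pvA cs i := by
  induction cs generalizing i with
  | nil => simp [PySem.List.enumerate_nil, pvA]
  | cons c cs ih =>
    rw [PySem.List.enumerate_cons, List.filterMap_cons]
    dsimp only
    by_cases h : c = '-'
    · rw [if_neg (by simp [h])]
      show List.filterMap (fun p => if p.2 ≠ '-' then some p.1 else none)
        (PySem.List.enumerate cs (i + 1)) = pvA (c :: cs) i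
      rw [ih]; simp [pvA, h]
    · rw [if_pos (by simp [h])]
      show i :: List.filterMap (fun p => if p.2 ≠ '-' then some p.1 else none)
        (PySem.List.enumerate cs (i + 1)) = pvA (c :: cs) i
      rw [ih]; simp [pvA, h]

theorem pvFillWhile_eq (n : Nat) (gen : List Int) (pos k : Int)
    (h : (pos + 1 - gen.length).toNat = n) :
    pvFillWhile gen pos k = gen ++ List.replicate n k := by
  induction n generalizing gen with
  | zero => rw [pvFillWhile]; have : ¬ ((gen.length : Int) ≤ pos) := by omega
            simp [this]
  | succ m ih =>
    rw [pvFillWhile]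
    have hle : (gen.length : Int) ≤ pos := by omega
    simp only [hle, if_pos]
    rw [ih (gen ++ [k]) (by simp; omega)]
    simp [List.replicate_succ]

theorem pvPadTail_eq (m : Nat) (gen : List Int) (n : Nat) (v : Int)
    (h : n - gen.length = m) :
    pvPadTail gen n v = gen ++ List.replicate m v := by
  induction m generalizing gen with
  | zero => rw [pvPadTail]; have : ¬ (gen.length < n) := by omega
            simp [this]
  | succ m ih =>
    rw [pvPadTail]
    have hlt : gen.length < n := by omega
    simp only [hlt, if_pos]
    rw [ih (gen ++ [v]) (by simp; omega)]
    simp [List.replicate_succ]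

-- the run-fill fold over al_inds followed by the tail pad equals the reference gen map
theorem portB_gen (cs : List Char) (p : Nat) (k : Int) (gen : List Int)
    (hlen : gen.length ≤ p) :
    pvPadTail
      ((PySem.List.enumerate (pvA cs p) k).foldl
        (fun g q => pvFillWhile g q.2 q.1) gen)
      (p + cs.length) (k + (pvC cs : Int))
    = gen ++ List.replicate (p - gen.length) k ++ pvG cs k := by
  induction cs generalizing p k gen with
  | nil =>
    simp only [pvA, pvC, PySem.List.enumerate_nil, List.foldl_nil, pvG, List.length_nil,
      Nat.add_zero, Int.natCast_zero, Int.add_zero, List.append_nil]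
    exact pvPadTail_eq _ _ _ _ (by omega)
  | cons c cs ih =>
    by_cases h : c = '-'
    · -- gap: position p is left pending, handled by a later fill or the pad
      simp only [pvA, pvG, pvC, h, ne_eq, not_true_eq_false, if_false, List.length_cons,
        Nat.zero_add]
      have hh := ih (p + 1) k gen (by omega)
      push_cast at hh
      rw [show p + (cs.length + 1) = (p+1) + cs.length by omega, hh,
          show p + 1 - gen.length = (p - gen.length) + 1 by omega,
          List.replicate_succ']
      simp
    · -- non-gap at p: fill runs up to p with k
      simp only [pvA, pvG, pvC, h, ne_eq, not_false_eq_true, if_true, List.length_cons]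
      rw [PySem.List.enumerate_cons]
      simp only [List.foldl_cons]
      rw [pvFillWhile_eq ((p : Int) + 1 - gen.length).toNat gen p k rfl]
      have hlen2 : (gen ++ List.replicate ((p : Int) + 1 - gen.length).toNat k).length ≤ p + 1 := by
        simp; omega
      have hh := ih (p + 1) (k + 1) (gen ++ List.replicate ((p : Int) + 1 - gen.length).toNat k) hlen2
      push_cast at hh
      rw [show p + (cs.length + 1) = (p+1) + cs.length by omega,
          show k + ((1 + pvC cs : Nat) : Int) = (k + 1) + (pvC cs : Int) by push_cast; ring,
          hh]
      have hrep : ((p : Int) + 1 - gen.length).toNat = (p - gen.length) + 1 := by omega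
      have hz : (p + 1) - (gen ++ List.replicate ((p : Int) + 1 - gen.length).toNat k).length = 0 := by
        simp; omega
      rw [hz, hrep, List.replicate_succ']
      simp

-- ===== VERDICT (by name: the statement is the Claim_ definition above) =====
theorem index_mapping_py_spec : Claim_equal_index_mapping_py := by
  intro aln _
  unfold Spec_index_mapping_py index_mapping_py index_mapping_py_alt
  rw [portA_spec]
  simp only [portB_al, List.nil_append, List.length_nil, Int.natCast_zero]
  rw [pvA_len]
  have h := portB_gen aln.toList 0 0 [] (by simp)
  simp only [Nat.cast_zero, Nat.zero_add, Int.zero_add, List.nil_append,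
    Nat.zero_sub, List.replicate_zero] at h
  rw [h]
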